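-- pv_equiv track=rewrite | github.com/Universatile/AdventofCode | day2.py | get_evensum
-- ===== SOURCE A (Python) =====
-- def get_evensum(array):
--     """Each row has two integers which divide evenly (no remainder).
--     This function returns the sum of the division of each of these pairs.
--     """
--     evensum = 0
--     for row in array:
--         for i in row:
--             for j in row:
--                 if i % j == 0 and i != j:
--                     evensum += i//j
--     return evensum
-- ===== SOURCE B (Python) =====
-- def get_evensum(array):
--     total = 0
--     for row in array:
--         counts = {}
--         for v in row:
--             counts[v] = counts.get(v, 0) + 1
--         for i, ci in counts.items():
--             for j, cj in counts.items():
--                 if i % j == 0 and i != j: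
--                     total += ci * cj * (i // j)
--     return total
-- ===== Notes on version B (the rewrite author's own statement) =====
-- stated objective: alternative
-- what changed: B replaces A's brute-force double loop over all element pairs of each row with a frequency dict built once per row and a double loop over the distinct values only, weighting each divisible pair by the product of the two counts.
import Mathlib
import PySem

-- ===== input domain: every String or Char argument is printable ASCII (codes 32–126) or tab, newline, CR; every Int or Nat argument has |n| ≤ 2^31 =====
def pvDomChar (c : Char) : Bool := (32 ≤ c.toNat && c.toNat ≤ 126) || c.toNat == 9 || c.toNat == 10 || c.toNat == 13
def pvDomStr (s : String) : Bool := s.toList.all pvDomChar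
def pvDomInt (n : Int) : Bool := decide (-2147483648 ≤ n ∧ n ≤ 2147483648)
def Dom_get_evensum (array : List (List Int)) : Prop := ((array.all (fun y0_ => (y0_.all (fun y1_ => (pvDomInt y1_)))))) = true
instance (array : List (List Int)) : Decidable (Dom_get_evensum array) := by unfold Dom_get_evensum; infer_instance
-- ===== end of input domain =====

-- B aggregates equal values with a frequency dict and sums over distinct value pairs
-- weighted by count products instead of A's brute-force loop over all element pairs (alternative decomposition).

-- ===== PORT A =====
def get_evensum (array : List (List Int)) : Int :=
  array.foldl (fun s row =>
    row.foldl (fun s i =>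
      row.foldl (fun s j =>
        if PySem.Int.mod i j = 0 ∧ i ≠ j then s + PySem.Int.floordiv i j else s) s) s) 0

-- ===== PORT B =====
def get_evensum_alt (array : List (List Int)) : Int :=
  array.foldl (fun s row =>
    let counts : PySem.Dict Int Int :=
      row.foldl (fun d v => d.insert v (d.getD v 0 + 1)) PySem.Dict.empty
    counts.items.foldl (fun s p =>
      counts.items.foldl (fun s q =>
        if PySem.Int.mod p.1 q.1 = 0 ∧ p.1 ≠ q.1 then s + p.2 * q.2 * PySem.Int.floordiv p.1 q.1
        else s) s) s) 0

-- ===== PRECONDITION & SPEC =====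
-- Pre_ excludes inputs where some row contains 0: there A (and B) raise ZeroDivisionError on 'i % 0'.
def Pre_get_evensum (array : List (List Int)) : Prop := ∀ row ∈ array, (0 : Int) ∉ row
instance (array : List (List Int)) : Decidable (Pre_get_evensum array) := by unfold Pre_get_evensum; infer_instance
def pvWitness_get_evensum : List (List Int) := [[4, 2], [9, 3, 6], [5, 9, 9]]

def Spec_get_evensum (array : List (List Int)) (out : Int) : Prop := out = get_evensum_alt array
instance (array : List (List Int)) (out : Int) : Decidable (Spec_get_evensum array out) := by unfold Spec_get_evensum; infer_instance

-- ===== CLAIM (what is proved, stated in full; the proofs are below) =====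
def Claim_equal_get_evensum : Prop := ∀ (array : List (List Int)), Dom_get_evensum array → Pre_get_evensum array → Spec_get_evensum array (get_evensum array)

-- ===== LEMMAS AND PROOFS =====

-- the pair contribution both programs test
def pvG (i j : Int) : Int := if PySem.Int.mod i j = 0 ∧ i ≠ j then PySem.Int.floordiv i j else 0

-- a fold 'if P x then s + f x else s' is 'init + sum of contributions'
theorem pv_foldl_ite_add {α : Type} (l : List α) (P : α → Prop) [DecidablePred P]
    (f : α → Int) (a : Int) :
    l.foldl (fun s x => if P x then s + f x else s) a
      = a + (l.map (fun x => if P x then f x else 0)).sum := by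
  rw [show (fun (s : Int) x => if P x then s + f x else s)
      = (fun s x => s + if P x then f x else 0) from by
    funext s x; split_ifs <;> simp]
  exact PySem.List.foldl_add _ _ _

-- sum of an indicator over a nodup list picks the one element
theorem pv_sum_indicator (K : List Int) (x : Int) (c : Int) (hnd : K.Nodup) (hx : x ∈ K) :
    (K.map (fun k => if k = x then c else 0)).sum = c := by
  induction K with
  | nil => cases hx
  | cons y t ih =>
    rcases List.nodup_cons.mp hnd with ⟨hyt, hndt⟩
    simp only [List.map_cons, List.sum_cons]
    rcases List.mem_cons.mp hx with h | h
    · subst h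
      rw [if_pos rfl]
      have hz : (t.map (fun k => if k = x then c else 0)).sum = 0 := by
        apply List.sum_eq_zero
        intro z hz
        rcases List.mem_map.mp hz with ⟨k, hk, rfl⟩
        have hkx : k ≠ x := fun e => hyt (e ▸ hk)
        simp [hkx]
      rw [hz]; ring
    · have hy : y ≠ x := fun e => hyt (e ▸ h)
      rw [if_neg hy, ih hndt h]; ring

-- a sum over a list equals the count-weighted sum over its distinct elements
theorem pv_sum_by_counts (l : List Int) (h : Int → Int) :
    (l.map h).sum
      = ((PySem.Set.ofList l).map (fun k => (l.count k : Int) * h k)).sum := by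
  have key : ∀ (m : List Int) (K : List Int), K.Nodup → (∀ x ∈ m, x ∈ K) →
      (K.map (fun k => (m.count k : Int) * h k)).sum = (m.map h).sum := by
    intro m
    induction m with
    | nil => intro K _ _; simp
    | cons x t ih =>
      intro K hnd hsub
      have hx : x ∈ K := hsub x (List.mem_cons_self)
      have ht : ∀ y ∈ t, y ∈ K := fun y hy => hsub y (List.mem_cons_of_mem _ hy)
      have expand : ∀ k : Int, (((x :: t).count k : Int) * h k)
          = ((t.count k : Int) * h k) + (if k = x then h x else 0) := by
        intro k
        by_cases hk : k = x
        · subst hk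
          rw [List.count_cons_self, if_pos rfl]
          push_cast; ring
        · rw [List.count_cons_of_ne (fun e => hk e.symm), if_neg hk]; ring
      calc (K.map (fun k => (((x :: t).count k : Int)) * h k)).sum
          = (K.map (fun k => ((t.count k : Int) * h k) + (if k = x then h x else 0))).sum := by
            exact congrArg List.sum (List.map_congr_left (fun k _ => expand k))
        _ = (K.map (fun k => (t.count k : Int) * h k)).sum
              + (K.map (fun k => if k = x then h x else 0)).sum := by
            rw [← PySem.List.sum_map_add_int]
        _ = (t.map h).sum + h x := by rw [ih K hnd ht, pv_sum_indicator K x (h x) hnd hx]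
        _ = ((x :: t).map h).sum := by simp; ring
  exact (key l (PySem.Set.ofList l) (PySem.Set.nodup_ofList l)
    (fun x hx => (PySem.Set.mem_ofList l x).mpr hx)).symm

-- A's per-row double loop as a nested sum
theorem pvA_row (row : List Int) (s : Int) :
    row.foldl (fun s i =>
      row.foldl (fun s j =>
        if PySem.Int.mod i j = 0 ∧ i ≠ j then s + PySem.Int.floordiv i j else s) s) s
    = s + (row.map (fun i => (row.map (fun j => pvG i j)).sum)).sum := by
  have inner : ∀ (i : Int) (a : Int),
      row.foldl (fun s j =>
        if PySem.Int.mod i j = 0 ∧ i ≠ j then s + PySem.Int.floordiv i j else s) a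
      = a + (row.map (fun j => pvG i j)).sum := by
    intro i a
    exact pv_foldl_ite_add row (fun j => PySem.Int.mod i j = 0 ∧ i ≠ j) _ a
  have step : row.foldl (fun s i =>
      row.foldl (fun s j =>
        if PySem.Int.mod i j = 0 ∧ i ≠ j then s + PySem.Int.floordiv i j else s) s) s
      = row.foldl (fun s i => s + (row.map (fun j => pvG i j)).sum) s := by
    apply PySem.List.foldl_congr_mem
    intro acc i _
    exact inner i acc
  rw [step]
  exact PySem.List.foldl_add _ _ _

-- B's per-row dict loop builds Counter(row); its items double loop as a nested sum
theorem pvB_row (row : List Int) (s : Int) :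
    (let counts : PySem.Dict Int Int :=
      row.foldl (fun d v => d.insert v (d.getD v 0 + 1)) PySem.Dict.empty
    counts.items.foldl (fun s p =>
      counts.items.foldl (fun s q =>
        if PySem.Int.mod p.1 q.1 = 0 ∧ p.1 ≠ q.1 then s + p.2 * q.2 * PySem.Int.floordiv p.1 q.1
        else s) s) s)
    = s + ((PySem.Set.ofList row).map (fun i =>
        ((PySem.Set.ofList row).map (fun j =>
          (row.count i : Int) * (row.count j : Int) * pvG i j)).sum)).sum := by
  simp only [PySem.Dict.foldl_insert_getD_add_one_eq_counter, PySem.Dict.items_counter]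
  have inner : ∀ (p : Int × Int) (a : Int),
      (((PySem.Set.ofList row).map (fun k => (k, (row.count k : Int)))).foldl (fun s q =>
        if PySem.Int.mod p.1 q.1 = 0 ∧ p.1 ≠ q.1 then s + p.2 * q.2 * PySem.Int.floordiv p.1 q.1
        else s) a)
      = a + ((PySem.Set.ofList row).map (fun j =>
          if PySem.Int.mod p.1 j = 0 ∧ p.1 ≠ j then p.2 * (row.count j : Int) * PySem.Int.floordiv p.1 j else 0)).sum := by
    intro p a
    rw [pv_foldl_ite_add _ (fun q : Int × Int => PySem.Int.mod p.1 q.1 = 0 ∧ p.1 ≠ q.1) _ a,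
      List.map_map]
    exact congrArg (a + ·) (congrArg List.sum (List.map_congr_left (fun j _ => rfl)))
  have step : (((PySem.Set.ofList row).map (fun k => (k, (row.count k : Int)))).foldl (fun s p =>
      (((PySem.Set.ofList row).map (fun k => (k, (row.count k : Int)))).foldl (fun s q =>
        if PySem.Int.mod p.1 q.1 = 0 ∧ p.1 ≠ q.1 then s + p.2 * q.2 * PySem.Int.floordiv p.1 q.1
        else s) s)) s)
      = (((PySem.Set.ofList row).map (fun k => (k, (row.count k : Int)))).foldl (fun s p =>
          s + ((PySem.Set.ofList row).map (fun j =>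
            if PySem.Int.mod p.1 j = 0 ∧ p.1 ≠ j then p.2 * (row.count j : Int) * PySem.Int.floordiv p.1 j else 0)).sum) s) := by
    apply PySem.List.foldl_congr_mem
    intro acc p _
    exact inner p acc
  rw [step, PySem.List.foldl_add, List.map_map]
  congr 1
  apply congrArg List.sum
  apply List.map_congr_left
  intro i _
  apply congrArg List.sum
  apply List.map_congr_left
  intro j _
  show (if PySem.Int.mod i j = 0 ∧ i ≠ j
      then (row.count i : Int) * (row.count j : Int) * PySem.Int.floordiv i j else 0)
    = (row.count i : Int) * (row.count j : Int) * pvG i j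
  simp only [pvG]
  split_ifs <;> ring

-- per-row sums agree: count-weighting over distinct values equals the raw double sum
theorem pv_row_eq (row : List Int) :
    (row.map (fun i => (row.map (fun j => pvG i j)).sum)).sum
    = ((PySem.Set.ofList row).map (fun i =>
        ((PySem.Set.ofList row).map (fun j =>
          (row.count i : Int) * (row.count j : Int) * pvG i j)).sum)).sum := by
  rw [pv_sum_by_counts row (fun i => (row.map (fun j => pvG i j)).sum)]
  apply congrArg List.sum
  apply List.map_congr_left
  intro i _
  rw [pv_sum_by_counts row (fun j => pvG i j)]
  rw [← List.sum_map_mul_left]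
  apply congrArg List.sum
  apply List.map_congr_left
  intro j _
  ring

-- ===== VERDICT (by name: the statement is the Claim_ definition above) =====
theorem get_evensum_spec : Claim_equal_get_evensum := by
  intro array _ _
  unfold Spec_get_evensum get_evensum get_evensum_alt
  apply PySem.List.foldl_congr_mem
  intro acc row _
  rw [pvA_row, pvB_row, pv_row_eq]
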